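-- pv_equiv track=rewrite | github.com/mporter2024/SHIELD_SAVER | Backend/routes/ai.py | _build_starter_task_titles
-- ===== SOURCE A (Python) =====
-- def _normalize_text(value):
--     return (value or "").strip().lower()
--
-- def _build_starter_task_titles(event):
--     title = _normalize_text(event.get("title"))
--     description = _normalize_text(event.get("description"))
--     location = _normalize_text(event.get("location"))
--     guest_count = int(event.get("guest_count") or 0)
--
--     combined = f"{title} {description} {location}"
--
--     tasks = [
--         "Confirm venue",
--         "Send invitations",
--     ]
--
--     if "network" in combined or "mixer" in combined:
--         tasks.extend([
--             "Prepare guest check-in list",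
--             "Arrange name tags",
--         ])
--
--     if "fundrais" in combined or "donation" in combined or "charity" in combined:
--         tasks.extend([
--             "Set up donation process",
--             "Prepare promotional materials",
--             "Reach out to sponsors",
--         ])
--
--     if "workshop" in combined or "training" in combined or "seminar" in combined:
--         tasks.extend([
--             "Prepare presentation materials",
--             "Confirm speaker or facilitator",
--             "Test room equipment",
--         ])
--
--     if "party" in combined or "celebration" in combined:
--         tasks.extend([
--             "Plan decorations",
--             "Prepare music or entertainment",
--         ])
--
--     if "cater" in combined or "food" in combined:
--         tasks.append("Arrange catering")
--
--     if guest_count >= 75: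
--         tasks.extend([
--             "Assign event staff or volunteers",
--             "Review crowd flow and seating",
--         ])
--
--     if guest_count >= 150:
--         tasks.append("Review security needs")
--
--     deduped = []
--     seen = set()
--     for task in tasks:
--         key = task.lower()
--         if key not in seen:
--             seen.add(key)
--             deduped.append(task)
--
--     return deduped
-- ===== SOURCE B (Python) =====
-- _KEYWORD_RULES = [
--     (("network", "mixer"),
--      ["Prepare guest check-in list", "Arrange name tags"]),
--     (("fundrais", "donation", "charity"),
--      ["Set up donation process", "Prepare promotional materials", "Reach out to sponsors"]),
--     (("workshop", "training", "seminar"),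
--      ["Prepare presentation materials", "Confirm speaker or facilitator", "Test room equipment"]),
--     (("party", "celebration"),
--      ["Plan decorations", "Prepare music or entertainment"]),
--     (("cater", "food"),
--      ["Arrange catering"]),
-- ]
--
-- _THRESHOLD_RULES = [
--     (75, ["Assign event staff or volunteers", "Review crowd flow and seating"]),
--     (150, ["Review security needs"]),
-- ]
--
--
-- def _build_starter_task_titles(event):
--     def norm(value):
--         return (value or "").strip().lower()
--
--     combined = f"{norm(event.get('title'))} {norm(event.get('description'))} {norm(event.get('location'))}"
--     guest_count = int(event.get("guest_count") or 0)
--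
--     tasks = ["Confirm venue", "Send invitations"]
--     for keywords, extra in _KEYWORD_RULES:
--         if any(kw in combined for kw in keywords):
--             tasks += extra
--     for minimum, extra in _THRESHOLD_RULES:
--         if guest_count >= minimum:
--             tasks += extra
--     # All rule titles are pairwise distinct (even case-insensitively), so no
--     # dedup pass is needed.
--     return tasks
-- ===== Notes on version B (the rewrite author's own statement) =====
-- stated objective: simpler
-- what changed: B replaces A's hard-coded chain of if-blocks with a data-driven rule table (keyword rules and guest-count thresholds folded over in one loop each) and drops the dedup pass entirely, which is a no-op because all rule titles are pairwise distinct even case-insensitively.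
import Mathlib
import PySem

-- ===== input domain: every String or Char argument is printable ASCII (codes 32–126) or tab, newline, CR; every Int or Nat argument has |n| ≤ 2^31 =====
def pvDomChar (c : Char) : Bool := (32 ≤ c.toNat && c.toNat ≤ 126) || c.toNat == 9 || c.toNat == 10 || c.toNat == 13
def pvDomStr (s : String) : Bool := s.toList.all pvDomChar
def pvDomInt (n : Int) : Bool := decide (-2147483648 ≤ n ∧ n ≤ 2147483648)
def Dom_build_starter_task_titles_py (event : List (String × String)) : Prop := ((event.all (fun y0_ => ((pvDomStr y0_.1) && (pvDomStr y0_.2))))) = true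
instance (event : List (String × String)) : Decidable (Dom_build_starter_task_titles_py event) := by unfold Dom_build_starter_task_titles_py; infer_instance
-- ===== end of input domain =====

-- ===== PORT A =====
-- B replaces the hard-coded if-chain with a rule table and drops the dedup
-- pass (a no-op: all rule titles are pairwise distinct, even lowercased).
def pvNormalizeA (value : Option String) : String :=
  PySem.Str.lower (PySem.Str.strip (value.getD ""))

def build_starter_task_titles_py (event : List (String × String)) : List String :=
  let title := pvNormalizeA (event.lookup "title")
  let description := pvNormalizeA (event.lookup "description")
  let location := pvNormalizeA (event.lookup "location")
  -- int(event.get("guest_count") or 0): Pre_ guarantees the string parses; none-case defaults to 0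
  let guest_count : Int :=
    match event.lookup "guest_count" with
    | none => 0
    | some s => if s = "" then 0 else (PySem.Int.ofStr? s).getD 0
  let combined := title ++ " " ++ description ++ " " ++ location
  let tasks := ["Confirm venue", "Send invitations"]
  let tasks := if PySem.Str.isIn "network" combined || PySem.Str.isIn "mixer" combined then
      tasks ++ ["Prepare guest check-in list", "Arrange name tags"] else tasks
  let tasks := if PySem.Str.isIn "fundrais" combined || PySem.Str.isIn "donation" combined || PySem.Str.isIn "charity" combined then
      tasks ++ ["Set up donation process", "Prepare promotional materials", "Reach out to sponsors"] else tasks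
  let tasks := if PySem.Str.isIn "workshop" combined || PySem.Str.isIn "training" combined || PySem.Str.isIn "seminar" combined then
      tasks ++ ["Prepare presentation materials", "Confirm speaker or facilitator", "Test room equipment"] else tasks
  let tasks := if PySem.Str.isIn "party" combined || PySem.Str.isIn "celebration" combined then
      tasks ++ ["Plan decorations", "Prepare music or entertainment"] else tasks
  let tasks := if PySem.Str.isIn "cater" combined || PySem.Str.isIn "food" combined then
      tasks ++ ["Arrange catering"] else tasks
  let tasks := if guest_count ≥ 75 then
      tasks ++ ["Assign event staff or volunteers", "Review crowd flow and seating"] else tasks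
  let tasks := if guest_count ≥ 150 then
      tasks ++ ["Review security needs"] else tasks
  -- dedup loop: seen is a Python set of lowered keys, deduped the kept tasks
  (tasks.foldl
    (fun (acc : List String × PySem.Set String) task =>
      let key := PySem.Str.lower task
      if acc.2.contains key then acc else (acc.1 ++ [task], acc.2.add key))
    ([], PySem.Set.empty)).1

-- ===== PORT B =====
def pvKeywordRules : List (List String × List String) :=
  [ (["network", "mixer"],
     ["Prepare guest check-in list", "Arrange name tags"]),
    (["fundrais", "donation", "charity"],
     ["Set up donation process", "Prepare promotional materials", "Reach out to sponsors"]),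
    (["workshop", "training", "seminar"],
     ["Prepare presentation materials", "Confirm speaker or facilitator", "Test room equipment"]),
    (["party", "celebration"],
     ["Plan decorations", "Prepare music or entertainment"]),
    (["cater", "food"],
     ["Arrange catering"]) ]

def pvThresholdRules : List (Int × List String) :=
  [ (75, ["Assign event staff or volunteers", "Review crowd flow and seating"]),
    (150, ["Review security needs"]) ]

def pvNormB (value : Option String) : String :=
  PySem.Str.lower (PySem.Str.strip (value.getD ""))

def build_starter_task_titles_py_alt (event : List (String × String)) : List String :=
  let combined := pvNormB (event.lookup "title") ++ " " ++
      pvNormB (event.lookup "description") ++ " " ++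
      pvNormB (event.lookup "location")
  let guest_count : Int :=
    match event.lookup "guest_count" with
    | none => 0
    | some s => if s = "" then 0 else (PySem.Int.ofStr? s).getD 0
  let tasks := pvKeywordRules.foldl
    (fun tasks r => if r.1.any (fun kw => PySem.Str.isIn kw combined) then tasks ++ r.2 else tasks)
    ["Confirm venue", "Send invitations"]
  pvThresholdRules.foldl
    (fun tasks r => if guest_count ≥ r.1 then tasks ++ r.2 else tasks)
    tasks

-- ===== PRECONDITION & SPEC =====
-- Pre_ excludes only inputs where Python A raises ValueError: a non-empty
-- "guest_count" string that int() cannot parse (both A and B raise there).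
def Pre_build_starter_task_titles_py (event : List (String × String)) : Prop :=
  ∀ s ∈ event.lookup "guest_count", s = "" ∨ (PySem.Int.ofStr? s).isSome
instance (event : List (String × String)) : Decidable (Pre_build_starter_task_titles_py event) := by
  unfold Pre_build_starter_task_titles_py; infer_instance

def pvWitness_build_starter_task_titles_py : (List (String × String)) :=
  [("title", "Charity Mixer"), ("guest_count", "80")]

def Spec_build_starter_task_titles_py (event : List (String × String)) (out : List String) : Prop := out = build_starter_task_titles_py_alt event
instance (event : List (String × String)) (out : List String) : Decidable (Spec_build_starter_task_titles_py event out) := by unfold Spec_build_starter_task_titles_py; infer_instance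

-- ===== CLAIM (what is proved, stated in full; the proofs are below) =====
def Claim_equal_build_starter_task_titles_py : Prop := ∀ (event : List (String × String)), Dom_build_starter_task_titles_py event → Pre_build_starter_task_titles_py event → Spec_build_starter_task_titles_py event (build_starter_task_titles_py event)

-- ===== LEMMAS AND PROOFS =====

-- proof-side helpers: one rule-application step and the dedup pass, as named
-- functions the two port bodies are definitionally equal to
def pvStepB (b : Bool) (extra tasks : List String) : List String :=
  if b then tasks ++ extra else tasks

def pvStepP (c : Prop) [Decidable c] (extra tasks : List String) : List String :=
  if c then tasks ++ extra else tasks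

def pvDedup (tasks : List String) : List String :=
  (tasks.foldl
    (fun (acc : List String × PySem.Set String) task =>
      let key := PySem.Str.lower task
      if acc.2.contains key then acc else (acc.1 ++ [task], acc.2.add key))
    ([], PySem.Set.empty)).1

-- core fact: A's dedup pass is a no-op on every task list the rule chain can
-- produce (all rule titles are pairwise distinct, even lowercased)
theorem pv_core (c1 c2 c3 c4 c5 d1 d2 d3 d4 d5 : Bool) (g : Int)
    (h1 : d1 = c1) (h2 : d2 = c2) (h3 : d3 = c3) (h4 : d4 = c4) (h5 : d5 = c5) :
    pvDedup
      (pvStepP (g ≥ 150) ["Review security needs"]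
        (pvStepP (g ≥ 75) ["Assign event staff or volunteers", "Review crowd flow and seating"]
          (pvStepB c5 ["Arrange catering"]
            (pvStepB c4 ["Plan decorations", "Prepare music or entertainment"]
              (pvStepB c3 ["Prepare presentation materials", "Confirm speaker or facilitator", "Test room equipment"]
                (pvStepB c2 ["Set up donation process", "Prepare promotional materials", "Reach out to sponsors"]
                  (pvStepB c1 ["Prepare guest check-in list", "Arrange name tags"]
                    ["Confirm venue", "Send invitations"]))))))) =
    pvStepP (g ≥ 150) ["Review security needs"]
      (pvStepP (g ≥ 75) ["Assign event staff or volunteers", "Review crowd flow and seating"]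
        (pvStepB d5 ["Arrange catering"]
          (pvStepB d4 ["Plan decorations", "Prepare music or entertainment"]
            (pvStepB d3 ["Prepare presentation materials", "Confirm speaker or facilitator", "Test room equipment"]
              (pvStepB d2 ["Set up donation process", "Prepare promotional materials", "Reach out to sponsors"]
                (pvStepB d1 ["Prepare guest check-in list", "Arrange name tags"]
                  ["Confirm venue", "Send invitations"])))))) := by
  subst h1; subst h2; subst h3; subst h4; subst h5
  cases d1 <;> cases d2 <;> cases d3 <;> cases d4 <;> cases d5 <;>
    by_cases h75 : g ≥ 75 <;> by_cases h150 : g ≥ 150 <;>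
      simp only [pvStepB, pvStepP, if_pos, h75, h150, Bool.false_eq_true] <;>
      decide

-- ===== VERDICT (by name: the statement is the Claim_ definition above) =====
-- named condition/value helpers (definitionally equal to the ports' subterms)
def pvCombined (event : List (String × String)) : String :=
  pvNormalizeA (event.lookup "title") ++ " " ++
    pvNormalizeA (event.lookup "description") ++ " " ++
    pvNormalizeA (event.lookup "location")

def pvGuest (event : List (String × String)) : Int :=
  match event.lookup "guest_count" with
  | none => 0
  | some s => if s = "" then 0 else (PySem.Int.ofStr? s).getD 0

def pvC1 (e : List (String × String)) : Bool :=
  PySem.Str.isIn "network" (pvCombined e) || PySem.Str.isIn "mixer" (pvCombined e)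
def pvC2 (e : List (String × String)) : Bool :=
  PySem.Str.isIn "fundrais" (pvCombined e) || PySem.Str.isIn "donation" (pvCombined e) || PySem.Str.isIn "charity" (pvCombined e)
def pvC3 (e : List (String × String)) : Bool :=
  PySem.Str.isIn "workshop" (pvCombined e) || PySem.Str.isIn "training" (pvCombined e) || PySem.Str.isIn "seminar" (pvCombined e)
def pvC4 (e : List (String × String)) : Bool :=
  PySem.Str.isIn "party" (pvCombined e) || PySem.Str.isIn "celebration" (pvCombined e)
def pvC5 (e : List (String × String)) : Bool :=
  PySem.Str.isIn "cater" (pvCombined e) || PySem.Str.isIn "food" (pvCombined e)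

def pvD1 (e : List (String × String)) : Bool :=
  (["network", "mixer"] : List String).any (fun kw => PySem.Str.isIn kw (pvCombined e))
def pvD2 (e : List (String × String)) : Bool :=
  (["fundrais", "donation", "charity"] : List String).any (fun kw => PySem.Str.isIn kw (pvCombined e))
def pvD3 (e : List (String × String)) : Bool :=
  (["workshop", "training", "seminar"] : List String).any (fun kw => PySem.Str.isIn kw (pvCombined e))
def pvD4 (e : List (String × String)) : Bool :=
  (["party", "celebration"] : List String).any (fun kw => PySem.Str.isIn kw (pvCombined e))
def pvD5 (e : List (String × String)) : Bool :=
  (["cater", "food"] : List String).any (fun kw => PySem.Str.isIn kw (pvCombined e))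

theorem pv_bridgeA (event : List (String × String)) :
    build_starter_task_titles_py event =
    pvDedup
      (pvStepP (pvGuest event ≥ 150) ["Review security needs"]
        (pvStepP (pvGuest event ≥ 75) ["Assign event staff or volunteers", "Review crowd flow and seating"]
          (pvStepB (pvC5 event) ["Arrange catering"]
            (pvStepB (pvC4 event) ["Plan decorations", "Prepare music or entertainment"]
              (pvStepB (pvC3 event) ["Prepare presentation materials", "Confirm speaker or facilitator", "Test room equipment"]
                (pvStepB (pvC2 event) ["Set up donation process", "Prepare promotional materials", "Reach out to sponsors"]
                  (pvStepB (pvC1 event) ["Prepare guest check-in list", "Arrange name tags"]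
                    ["Confirm venue", "Send invitations"]))))))) := rfl

theorem pv_bridgeB (event : List (String × String)) :
    build_starter_task_titles_py_alt event =
    pvStepP (pvGuest event ≥ 150) ["Review security needs"]
      (pvStepP (pvGuest event ≥ 75) ["Assign event staff or volunteers", "Review crowd flow and seating"]
        (pvStepB (pvD5 event) ["Arrange catering"]
          (pvStepB (pvD4 event) ["Plan decorations", "Prepare music or entertainment"]
            (pvStepB (pvD3 event) ["Prepare presentation materials", "Confirm speaker or facilitator", "Test room equipment"]
              (pvStepB (pvD2 event) ["Set up donation process", "Prepare promotional materials", "Reach out to sponsors"]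
                (pvStepB (pvD1 event) ["Prepare guest check-in list", "Arrange name tags"]
                  ["Confirm venue", "Send invitations"])))))) := by
  unfold build_starter_task_titles_py_alt
  simp only [pvKeywordRules, pvThresholdRules, List.foldl_cons, List.foldl_nil]
  rfl


-- ===== VERDICT (by name: the statement is the Claim_ definition above) =====
theorem build_starter_task_titles_py_spec : Claim_equal_build_starter_task_titles_py := by
  intro event _ _
  unfold Spec_build_starter_task_titles_py
  rw [pv_bridgeA, pv_bridgeB]
  exact pv_core _ _ _ _ _ _ _ _ _ _ _
    (by simp [pvC1, pvD1]) (by simp [pvC2, pvD2, Bool.or_assoc])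
    (by simp [pvC3, pvD3, Bool.or_assoc]) (by simp [pvC4, pvD4]) (by simp [pvC5, pvD5])
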